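-- pv_equiv track=rewrite | github.com/yyfsunnyboy/Mathproject_tvet_mathB | core/routes/analysis.py | _f9_tutor_guidance_pick
-- ===== SOURCE A (Python) =====
-- _F9_TUTOR_ROWS = (
--     # (mechanism, step_focus or "" for default, hint_focus, guided_question, micro_step)
--     ("structure_error", "subtract_row_1", "對齊相減後各列", "次方直欄是否對齊？", "缺項可補零再減"),
--     ("structure_error", "quotient_term_1", "對齊商與被除式", "第一次商對到哪一階項？", "先寫第一次商"),
--     ("structure_error", "final_remainder", "最後一列要對齊", "餘式與除式次方？", "確認最底行寫完"),
--     ("structure_error", "", "長除法列要對齊", "商、乘回、相減順序？", "由上到下逐步核對"),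
--     ("sign_error", "final_remainder", "相減後餘項變號", "最底行每項符號？", "整行相減逐項改"),
--     ("sign_error", "subtract_row_1", "相減要逐項變號", "這列減上列每項？", "先改符號再加"),
--     ("sign_error", "", "相減逐項變號", "上下相減有漏負？", "整行取反再相加"),
--     ("operation_error", "final_remainder", "最後餘數要檢查", "餘式還能再除？", "看餘式次方"),
--     ("operation_error", "quotient_term_2", "下一項商核對", "降次後再除一次？", "對齊再取下一商"),
--     ("operation_error", "subtract_row_2", "第二次相減核對", "乘回列是否完整？", "先乘回再相減"),
--     ("operation_error", "quotient_term_1", "第一次相除核對", "首項除以除式首項？", "只決定第一項商"),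
--     ("operation_error", "", "乘回與相減規則", "商的每項都乘除式？", "一步一步寫乘回"),
--     ("notation_error", "final_remainder", "餘數要寫清楚", "最後有沒有標餘？", "用商餘格式彙整"),
--     ("notation_error", "", "長除法書寫", "商與餘數標示？", "依題目格式整理"),
-- )
--
-- def _f9_tutor_guidance_pick(error_mechanism: str, step_focus: str):
--     mech = str(error_mechanism or "").strip()
--     step = str(step_focus or "").strip()
--     for m, s, h, g, ms in _F9_TUTOR_ROWS:
--         if m == mech and s == step:
--             return h, g, ms
--     for m, s, h, g, ms in _F9_TUTOR_ROWS:
--         if m == mech and s == "":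
--             return h, g, ms
--     return None
-- ===== SOURCE B (Python) =====
-- _F9_TUTOR_ROWS = (
--     ("structure_error", "subtract_row_1", "對齊相減後各列", "次方直欄是否對齊？", "缺項可補零再減"),
--     ("structure_error", "quotient_term_1", "對齊商與被除式", "第一次商對到哪一階項？", "先寫第一次商"),
--     ("structure_error", "final_remainder", "最後一列要對齊", "餘式與除式次方？", "確認最底行寫完"),
--     ("structure_error", "", "長除法列要對齊", "商、乘回、相減順序？", "由上到下逐步核對"),
--     ("sign_error", "final_remainder", "相減後餘項變號", "最底行每項符號？", "整行相減逐項改"),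
--     ("sign_error", "subtract_row_1", "相減要逐項變號", "這列減上列每項？", "先改符號再加"),
--     ("sign_error", "", "相減逐項變號", "上下相減有漏負？", "整行取反再相加"),
--     ("operation_error", "final_remainder", "最後餘數要檢查", "餘式還能再除？", "看餘式次方"),
--     ("operation_error", "quotient_term_2", "下一項商核對", "降次後再除一次？", "對齊再取下一商"),
--     ("operation_error", "subtract_row_2", "第二次相減核對", "乘回列是否完整？", "先乘回再相減"),
--     ("operation_error", "quotient_term_1", "第一次相除核對", "首項除以除式首項？", "只決定第一項商"),
--     ("operation_error", "", "乘回與相減規則", "商的每項都乘除式？", "一步一步寫乘回"),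
--     ("notation_error", "final_remainder", "餘數要寫清楚", "最後有沒有標餘？", "用商餘格式彙整"),
--     ("notation_error", "", "長除法書寫", "商與餘數標示？", "依題目格式整理"),
-- )
--
-- def _f9_tutor_guidance_pick(error_mechanism: str, step_focus: str):
--     # Single pass: return the exact (mechanism, step) hit immediately; while
--     # scanning, remember the first empty-step row of the mechanism as fallback.
--     mech = str(error_mechanism or "").strip()
--     step = str(step_focus or "").strip()
--     default = None
--     for m, s, h, g, ms in _F9_TUTOR_ROWS:
--         if m == mech:
--             if s == step:
--                 return h, g, ms
--             if default is None and s == "":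
--                 default = (h, g, ms)
--     return default
-- ===== Notes on version B (the rewrite author's own statement) =====
-- stated objective: simpler
-- what changed: Replaces A's two staged linear scans of the row table by one single pass with an accumulator: the exact (mechanism, step) hit returns immediately, and the first empty-step row of the mechanism is remembered as the fallback returned at the end.
import Mathlib
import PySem

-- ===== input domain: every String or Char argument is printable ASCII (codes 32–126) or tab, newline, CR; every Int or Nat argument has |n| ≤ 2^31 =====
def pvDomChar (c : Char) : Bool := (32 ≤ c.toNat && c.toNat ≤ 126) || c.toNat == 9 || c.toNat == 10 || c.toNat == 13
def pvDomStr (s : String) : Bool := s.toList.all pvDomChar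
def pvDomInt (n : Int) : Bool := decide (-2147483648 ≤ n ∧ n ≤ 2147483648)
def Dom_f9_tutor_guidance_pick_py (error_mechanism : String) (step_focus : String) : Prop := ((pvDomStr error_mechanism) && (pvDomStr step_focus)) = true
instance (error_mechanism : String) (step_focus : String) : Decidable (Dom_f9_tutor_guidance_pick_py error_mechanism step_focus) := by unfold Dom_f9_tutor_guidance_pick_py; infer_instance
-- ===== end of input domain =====

-- B replaces A's two staged scans of the row table by one single pass with a remembered fallback; same result, one traversal.

-- the module-level row table (shared data, not code)
def pvF9Rows : List (String × String × String × String × String) :=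
  [ ("structure_error", "subtract_row_1", "對齊相減後各列", "次方直欄是否對齊？", "缺項可補零再減"),
    ("structure_error", "quotient_term_1", "對齊商與被除式", "第一次商對到哪一階項？", "先寫第一次商"),
    ("structure_error", "final_remainder", "最後一列要對齊", "餘式與除式次方？", "確認最底行寫完"),
    ("structure_error", "", "長除法列要對齊", "商、乘回、相減順序？", "由上到下逐步核對"),
    ("sign_error", "final_remainder", "相減後餘項變號", "最底行每項符號？", "整行相減逐項改"),
    ("sign_error", "subtract_row_1", "相減要逐項變號", "這列減上列每項？", "先改符號再加"),
    ("sign_error", "", "相減逐項變號", "上下相減有漏負？", "整行取反再相加"),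
    ("operation_error", "final_remainder", "最後餘數要檢查", "餘式還能再除？", "看餘式次方"),
    ("operation_error", "quotient_term_2", "下一項商核對", "降次後再除一次？", "對齊再取下一商"),
    ("operation_error", "subtract_row_2", "第二次相減核對", "乘回列是否完整？", "先乘回再相減"),
    ("operation_error", "quotient_term_1", "第一次相除核對", "首項除以除式首項？", "只決定第一項商"),
    ("operation_error", "", "乘回與相減規則", "商的每項都乘除式？", "一步一步寫乘回"),
    ("notation_error", "final_remainder", "餘數要寫清楚", "最後有沒有標餘？", "用商餘格式彙整"),
    ("notation_error", "", "長除法書寫", "商與餘數標示？", "依題目格式整理") ]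

-- ===== PORT A =====
-- A's first loop: return the first row with m == mech and s == step
def pvScanExact : List (String × String × String × String × String) → String → String → Option (String × String × String)
  | [], _, _ => none
  | r :: rest, mech, step =>
      if r.1 = mech ∧ r.2.1 = step then some r.2.2 else pvScanExact rest mech step

-- A's second loop: return the first row with m == mech and s == ""
def pvScanDefault : List (String × String × String × String × String) → String → Option (String × String × String)
  | [], _ => none
  | r :: rest, mech =>
      if r.1 = mech ∧ r.2.1 = "" then some r.2.2 else pvScanDefault rest mech

def f9_tutor_guidance_pick_py (error_mechanism : String) (step_focus : String) : Option (String × String × String) :=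
  let mech := PySem.Str.strip error_mechanism   -- str(error_mechanism or "").strip(): identity up to strip on a str argument
  let step := PySem.Str.strip step_focus
  match pvScanExact pvF9Rows mech step with
  | some v => some v
  | none => pvScanDefault pvF9Rows mech

-- ===== PORT B =====
-- B's single loop: return the exact hit immediately; remember the first empty-step
-- row of the mechanism in the accumulator 'default', returned when the scan ends.
def pvPick : List (String × String × String × String × String) → String → String → Option (String × String × String) → Option (String × String × String)
  | [], _, _, default => default
  | r :: rest, mech, step, default =>
      if r.1 = mech then
        if r.2.1 = step then some r.2.2
        else pvPick rest mech step (if default = none ∧ r.2.1 = "" then some r.2.2 else default)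
      else pvPick rest mech step default

def f9_tutor_guidance_pick_py_alt (error_mechanism : String) (step_focus : String) : Option (String × String × String) :=
  let mech := PySem.Str.strip error_mechanism
  let step := PySem.Str.strip step_focus
  pvPick pvF9Rows mech step none

-- ===== PRECONDITION & SPEC =====
def Spec_f9_tutor_guidance_pick_py (error_mechanism : String) (step_focus : String) (out : Option (String × String × String)) : Prop := out = f9_tutor_guidance_pick_py_alt error_mechanism step_focus
instance (error_mechanism : String) (step_focus : String) (out : Option (String × String × String)) : Decidable (Spec_f9_tutor_guidance_pick_py error_mechanism step_focus out) := by unfold Spec_f9_tutor_guidance_pick_py; infer_instance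

-- ===== CLAIM =====
def Claim_equal_f9_tutor_guidance_pick_py : Prop := ∀ (error_mechanism : String) (step_focus : String), Dom_f9_tutor_guidance_pick_py error_mechanism step_focus → Spec_f9_tutor_guidance_pick_py error_mechanism step_focus (f9_tutor_guidance_pick_py error_mechanism step_focus)

-- ===== LEMMAS AND PROOFS =====

-- invariant of B's single pass: exact hit wins, else the earliest of (accumulator, first default row)
theorem pv_pick_invariant (rows : List (String × String × String × String × String))
    (mech step : String) (acc : Option (String × String × String)) :
    pvPick rows mech step acc
      = (pvScanExact rows mech step).or (acc.or (pvScanDefault rows mech)) := by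
  induction rows generalizing acc with
  | nil => cases acc <;> rfl
  | cons r rest ih =>
    simp only [pvPick, pvScanExact, pvScanDefault]
    by_cases hm : r.1 = mech
    · by_cases hs : r.2.1 = step
      · simp [hm, hs]
      · simp only [hm, hs, if_true, if_false, and_true, and_false]
        rw [ih]
        by_cases hd : r.2.1 = ""
        · simp only [hd, and_true, if_true]
          cases acc <;> simp
        · simp [hd]
    · have h1 : ¬ (r.1 = mech ∧ r.2.1 = step) := fun h => hm h.1
      have h2 : ¬ (r.1 = mech ∧ r.2.1 = "") := fun h => hm h.1
      simp only [hm, if_false]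
      exact ih acc

-- ===== VERDICT (by name: the statement is the Claim_ definition above) =====
theorem f9_tutor_guidance_pick_py_spec : Claim_equal_f9_tutor_guidance_pick_py := by
  intro em sf _
  unfold Spec_f9_tutor_guidance_pick_py f9_tutor_guidance_pick_py f9_tutor_guidance_pick_py_alt
  rw [pv_pick_invariant]
  cases h : pvScanExact pvF9Rows (PySem.Str.strip em) (PySem.Str.strip sf) <;> simp [h]
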